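-- pv_equiv track=rewrite | github.com/ansible/anonymizer | ansible_anonymizer/anonymizer.py | hide_comments
-- ===== SOURCE A (Python) =====
-- def hide_comments(block: str) -> str:
--     new_block = ""
--     quotes = ""
--     in_comment = False
--     for c in block:
--         if c == "\n":
--             in_comment = False
--             quotes = ""
--             new_block += c
--         elif in_comment:
--             continue
--         elif c in ['"', "'"]:
--             if quotes and quotes[-1] == c:
--                 quotes = quotes[:-1]
--             else:
--                 quotes += c
--             new_block += c
--         elif c == "#" and not quotes:
--             in_comment = True
--             new_block = new_block.rstrip(" ")
--         else:
--             new_block += c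
--     return new_block
-- ===== SOURCE B (Python) =====
-- def _strip_line(line):
--     quotes = []
--     kept = []
--     for c in line:
--         if c == '"' or c == "'":
--             if quotes and quotes[-1] == c:
--                 quotes.pop()
--             else:
--                 quotes.append(c)
--             kept.append(c)
--         elif c == "#" and not quotes:
--             return "".join(kept).rstrip(" ")
--         else:
--             kept.append(c)
--     return "".join(kept)
--
--
-- def hide_comments(block: str) -> str:
--     return "\n".join(_strip_line(line) for line in block.split("\n"))
-- ===== Notes on version B (the rewrite author's own statement) =====
-- stated objective: simpler
-- what changed: B splits the block into lines and strips each line with an independent scan (fresh quote stack, early return at an unquoted '#', per-line rstrip), then joins with newlines, replacing A's single stateful fold with newline branch, in_comment flag and mid-loop state resets.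
import Mathlib
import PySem

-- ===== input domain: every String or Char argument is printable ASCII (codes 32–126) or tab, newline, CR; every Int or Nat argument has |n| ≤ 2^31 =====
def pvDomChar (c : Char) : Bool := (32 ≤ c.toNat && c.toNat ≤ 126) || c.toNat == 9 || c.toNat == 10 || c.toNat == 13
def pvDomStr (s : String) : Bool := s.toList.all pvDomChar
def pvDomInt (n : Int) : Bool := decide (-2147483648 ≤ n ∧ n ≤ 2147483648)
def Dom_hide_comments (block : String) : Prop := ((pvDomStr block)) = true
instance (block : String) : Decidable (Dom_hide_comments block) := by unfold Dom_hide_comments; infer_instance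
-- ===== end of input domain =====

-- B splits the block into lines and strips each line independently (fresh quote
-- state per line, early return at an unquoted '#'), instead of A's single fold
-- with an in_comment flag and mid-loop state resets; same return value.

-- exact port of Python's str.rstrip(" ") (strips trailing ' ' only), used by both Pythons
def rstripSp (l : List Char) : List Char := (l.reverse.dropWhile (· = ' ')).reverse

-- ===== PORT A =====
-- loop state: (new_block, quotes, in_comment)
def stepA (st : List Char × List Char × Bool) (c : Char) : List Char × List Char × Bool :=
  match st with
  | (nb, q, inc) =>
    if c = '\n' then (nb ++ [c], [], false)
    else if inc then (nb, q, inc)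
    else if c = '"' ∨ c = '\'' then
      if q ≠ [] ∧ q.getLast? = some c then (nb ++ [c], q.dropLast, inc)
      else (nb ++ [c], q ++ [c], inc)
    else if c = '#' ∧ q = [] then (rstripSp nb, q, true)
    else (nb ++ [c], q, inc)

def hide_comments (block : String) : String :=
  String.ofList (block.toList.foldl stepA ([], [], false)).1

-- ===== PORT B =====
-- per-line scan: kept buffer + quote stack, early return at an unquoted '#'
def lineGo : List Char → List Char → List Char → List Char
  | kept, _, [] => kept
  | kept, q, c :: rest =>
    if c = '"' ∨ c = '\'' then
      lineGo (kept ++ [c])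
        (if q ≠ [] ∧ q.getLast? = some c then q.dropLast else q ++ [c]) rest
    else if c = '#' ∧ q = [] then rstripSp kept
    else lineGo (kept ++ [c]) q rest

def strip_line (l : List Char) : List Char := lineGo [] [] l

-- port of str.split("\n")
def splitNl : List Char → List (List Char)
  | [] => [[]]
  | c :: rest =>
    if c = '\n' then [] :: splitNl rest
    else
      match splitNl rest with
      | [] => [[c]]
      | f :: ls => (c :: f) :: ls

def hide_comments_alt (block : String) : String :=
  String.ofList (List.intercalate ['\n'] ((splitNl block.toList).map strip_line))

-- ===== PRECONDITION & SPEC =====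
def Spec_hide_comments (block : String) (out : String) : Prop := out = hide_comments_alt block
instance (block : String) (out : String) : Decidable (Spec_hide_comments block out) := by unfold Spec_hide_comments; infer_instance

-- ===== CLAIM (what is proved, stated in full; the proofs are below) =====
def Claim_equal_hide_comments : Prop := ∀ (block : String), Dom_hide_comments block → Spec_hide_comments block (hide_comments block)

-- ===== LEMMAS AND PROOFS =====

theorem splitNl_ne_nil (l : List Char) : splitNl l ≠ [] := by
  cases l with
  | nil => simp [splitNl]
  | cons c rest =>
    simp only [splitNl]
    split
    · simp
    · cases h : splitNl rest <;> simp

-- tail lines contribution, each preceded by '\n'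
def dPart (l : List Char) : List Char :=
  ((splitNl l).tail).flatMap (fun s => '\n' :: strip_line s)

-- the whole remaining output from a mid-line state
def gPart (kept q l : List Char) : List Char :=
  lineGo kept q ((splitNl l).headI) ++ dPart l

theorem intercalate_nl (f : List Char) (ls : List (List Char)) :
    List.intercalate ['\n'] (f :: ls) = f ++ ls.flatMap (fun s => '\n' :: s) := by
  induction ls generalizing f with
  | nil => simp [List.intercalate]
  | cons g gs ih =>
    rw [List.flatMap_cons]
    have h1 := ih g
    simp only [List.intercalate, List.intersperse] at h1 ⊢
    cases gs <;> simp_all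

theorem gPart_eq (l : List Char) :
    gPart [] [] l = List.intercalate ['\n'] ((splitNl l).map strip_line) := by
  obtain ⟨h, t, he⟩ := List.exists_cons_of_ne_nil (splitNl_ne_nil l)
  rw [gPart, dPart, he]
  simp [intercalate_nl, strip_line, List.flatMap_map]

theorem rstripSp_append (pre kept : List Char)
    (h : pre = [] ∨ pre.getLast? = some '\n') :
    rstripSp (pre ++ kept) = pre ++ rstripSp kept := by
  rcases h with h | h
  · simp [h]
  · have hne : pre.reverse ≠ [] := by
      intro hx; rw [List.reverse_eq_nil_iff] at hx; subst hx; simp at h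
    obtain ⟨c, pre'', hp⟩ := List.exists_cons_of_ne_nil hne
    have hc : c = '\n' := by
      rw [List.getLast?_eq_head?_reverse, hp] at h; simpa using h
    subst hc
    have hpe : pre = pre''.reverse ++ ['\n'] := by
      have := congrArg List.reverse hp; simpa using this
    subst hpe
    simp only [rstripSp, List.reverse_append, List.reverse_reverse,
      List.reverse_singleton, List.singleton_append]
    rw [List.dropWhile_append]
    split
    · next hc =>
      have h0 : List.dropWhile (fun x => decide (x = ' ')) kept.reverse = [] := by
        simpa [List.isEmpty_iff] using hc
      simp [List.dropWhile_cons, h0]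
    · simp

theorem main_fold (l : List Char) :
    (∀ pre kept q, (pre = [] ∨ pre.getLast? = some '\n') →
      (l.foldl stepA (pre ++ kept, q, false)).1 = pre ++ gPart kept q l)
    ∧ (∀ nb q, (l.foldl stepA (nb, q, true)).1 = nb ++ dPart l) := by
  induction l with
  | nil =>
    constructor
    · intro pre kept q _; simp [gPart, dPart, splitNl, lineGo]
    · intro nb q; simp [dPart, splitNl]
  | cons c rest ih =>
    obtain ⟨ih1, ih2⟩ := ih
    obtain ⟨h, t, he⟩ := List.exists_cons_of_ne_nil (splitNl_ne_nil rest)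
    constructor
    · intro pre kept q hpre
      by_cases hc : c = '\n'
      · subst hc
        rw [List.foldl_cons]
        simp only [stepA, if_true, reduceIte]
        have := ih1 (pre ++ kept ++ ['\n']) [] []
          (Or.inr (by simp))
        rw [List.append_nil] at this
        rw [this]
        simp only [gPart, dPart, splitNl, if_pos rfl, List.tail_cons, List.headI_cons,
          lineGo, he, List.flatMap_cons, List.headI_cons, List.tail_cons]
        simp [strip_line, lineGo]
      · by_cases hq : c = '"' ∨ c = '\''
        · have hne : ¬ c = '\n' := hc
          rw [List.foldl_cons]
          simp only [stepA, if_neg hne, if_pos hq, Bool.false_eq_true, if_false]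
          have hsp : splitNl (c :: rest) = (c :: h) :: t := by
            simp [splitNl, if_neg hne, he]
          by_cases hpop : q ≠ [] ∧ q.getLast? = some c
          · rw [if_pos hpop]
            have := ih1 pre (kept ++ [c]) q.dropLast hpre
            rw [← List.append_assoc] at this
            rw [this]
            simp only [gPart, hsp, he, List.headI_cons, List.tail_cons, dPart, lineGo,
              if_pos hq, if_pos hpop]
          · rw [if_neg hpop]
            have := ih1 pre (kept ++ [c]) (q ++ [c]) hpre
            rw [← List.append_assoc] at this
            rw [this]
            simp only [gPart, hsp, he, List.headI_cons, List.tail_cons, dPart, lineGo,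
              if_pos hq, if_neg hpop]
        · by_cases hh : c = '#' ∧ q = []
          · rw [List.foldl_cons]
            simp only [stepA, if_neg hc, Bool.false_eq_true, if_false, if_neg hq, if_pos hh]
            rw [rstripSp_append pre kept hpre, ih2]
            have hsp : splitNl (c :: rest) = (c :: h) :: t := by
              simp [splitNl, if_neg hc, he]
            simp only [gPart, hsp, he, List.headI_cons, List.tail_cons, dPart, lineGo,
              if_neg hq, if_pos hh, List.append_assoc]
          · rw [List.foldl_cons]
            simp only [stepA, if_neg hc, Bool.false_eq_true, if_false, if_neg hq, if_neg hh]
            have := ih1 pre (kept ++ [c]) q hpre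
            rw [← List.append_assoc] at this
            rw [this]
            have hsp : splitNl (c :: rest) = (c :: h) :: t := by
              simp [splitNl, if_neg hc, he]
            simp only [gPart, hsp, he, List.headI_cons, List.tail_cons, dPart, lineGo,
              if_neg hq, if_neg hh]
    · intro nb q
      by_cases hc : c = '\n'
      · subst hc
        rw [List.foldl_cons]
        simp only [stepA, if_true, reduceIte]
        have := ih1 (nb ++ ['\n']) [] [] (Or.inr (by simp))
        rw [List.append_nil] at this
        rw [this]
        simp only [dPart, splitNl, if_pos rfl, List.tail_cons, gPart, he,
          List.flatMap_cons, List.headI_cons, List.tail_cons]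
        simp [strip_line, lineGo]
      · rw [List.foldl_cons]
        simp only [stepA, if_neg hc, if_true, reduceIte]
        rw [ih2]
        have hsp : splitNl (c :: rest) = (c :: h) :: t := by
          simp [splitNl, if_neg hc, he]
        simp only [dPart, hsp, he, List.tail_cons]

-- ===== VERDICT (by name: the statement is the Claim_ definition above) =====
theorem hide_comments_spec : Claim_equal_hide_comments := by
  intro block _
  show hide_comments block = hide_comments_alt block
  unfold hide_comments hide_comments_alt
  have := (main_fold block.toList).1 [] [] [] (Or.inl rfl)
  simp only [List.nil_append] at this
  rw [this, gPart_eq]
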